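-- pv_equiv track=rewrite | github.com/xiuchengquek/QuadFinder | Working/steps/convertGenomicLoc.py | exons_loop
-- ===== SOURCE A (Python) =====
-- def exons_loop(exons, strandness=None):
--     """
--     :param exons: list of dictioanry. each dictionary will contain 2 keys "start", "end", value should be integer,
--      if not function will convert.
--
--     :return: list of dictioanry, each dictionary now contains 4 keys "g_start, g_end, t_start, t_end" all value are
--     integer
--     """
--     return_list = []
--     if strandness == "-":
--         exons = reversed(exons)
--
--     previous_end = 0
--     for x in exons:
--         exon_length = int(x['end']) - int(x['start'])
--         t_start = previous_end + 1
--         t_end = t_start + exon_length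
--         previous_end = t_end
--         return_list.append({
--             "g_start" : int(x['start']) , "g_end" : int(x['end']) ,
--             "t_start" : t_start ,  "t_end" : t_end })
--
--     if strandness == "-":
--         return [x for x in reversed(return_list)]
--     return return_list
-- ===== SOURCE B (Python) =====
-- def exons_loop(exons, strandness=None):
--     """Reversal-free reformulation: build one exclusive prefix-sum table of
--     exon weights (length+1) over the exons in their GIVEN order, then derive
--     each exon's transcript end arithmetically -- prefix+weight on '+',
--     total-prefix on '-' (because on the minus strand exon i's transcript end
--     is the suffix sum of weights from i).  No reversed() anywhere."""
--     starts = [int(x['start']) for x in exons]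
--     ends = [int(x['end']) for x in exons]
--     weights = [e - s + 1 for s, e in zip(starts, ends)]
--     prefix = [0]
--     for w in weights:
--         prefix.append(prefix[-1] + w)
--     total = prefix[-1]
--     neg = strandness == "-"
--     out = []
--     for s, e, w, p in zip(starts, ends, weights, prefix):
--         t_end = total - p if neg else p + w
--         out.append({"g_start": s, "g_end": e,
--                     "t_start": t_end - (w - 1), "t_end": t_end})
--     return out
-- ===== Notes on version B (the rewrite author's own statement) =====
-- stated objective: alternative
-- what changed: Removed both reversals and the running previous_end: B builds an exclusive prefix-sum table of exon weights once over the exons in given order and derives each transcript end arithmetically (prefix+weight on '+', total-prefix on '-', i.e. a suffix sum), producing the output directly in original order.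
import Mathlib
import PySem

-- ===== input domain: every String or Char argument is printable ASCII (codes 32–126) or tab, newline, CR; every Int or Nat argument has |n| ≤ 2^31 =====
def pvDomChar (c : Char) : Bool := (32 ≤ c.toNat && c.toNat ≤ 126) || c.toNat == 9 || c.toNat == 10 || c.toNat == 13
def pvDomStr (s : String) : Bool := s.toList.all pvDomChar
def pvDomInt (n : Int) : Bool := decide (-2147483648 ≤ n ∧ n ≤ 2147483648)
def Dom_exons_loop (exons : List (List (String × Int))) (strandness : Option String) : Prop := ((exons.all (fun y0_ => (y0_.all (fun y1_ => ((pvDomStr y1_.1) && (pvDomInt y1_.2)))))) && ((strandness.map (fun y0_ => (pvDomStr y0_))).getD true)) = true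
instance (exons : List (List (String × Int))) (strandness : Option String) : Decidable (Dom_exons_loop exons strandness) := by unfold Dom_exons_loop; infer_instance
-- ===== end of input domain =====

-- B replaces A's reverse/running-end/reverse-back scheme by a reversal-free prefix-sum
-- table with per-strand index arithmetic; alternative decomposition, same O(n) cost.

-- ===== PORT A =====
-- shared dict-lookup helpers (Python x['start'] / x['end']; Pre_ guarantees the keys exist)
def sVal (x : List (String × Int)) : Int := ((PySem.Dict.mk x).get? "start").getD 0
def eVal (x : List (String × Int)) : Int := ((PySem.Dict.mk x).get? "end").getD 0

-- literal port of A: optional reverse, one fold carrying (previous_end, return_list), reverse back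
def exons_loop (exons : List (List (String × Int))) (strandness : Option String) : List (List (String × Int)) :=
  let exs := if strandness = some "-" then exons.reverse else exons
  let res := exs.foldl (fun (st : Int × List (List (String × Int))) x =>
      let s := sVal x
      let e := eVal x
      let exon_length := e - s
      let t_start := st.1 + 1
      let t_end := t_start + exon_length
      (t_end, st.2 ++ [[("g_start", s), ("g_end", e), ("t_start", t_start), ("t_end", t_end)]]))
    (0, ([] : List (List (String × Int))))
  if strandness = some "-" then res.2.reverse else res.2

-- ===== PORT B =====
-- literal port of Source B: starts/ends/weights, an exclusive prefix table, total,
-- then one zip pass deriving t_end arithmetically per strand; no reversal at all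
def exons_loop_alt (exons : List (List (String × Int))) (strandness : Option String) : List (List (String × Int)) :=
  let starts := exons.map sVal
  let ends := exons.map eVal
  let weights := (starts.zip ends).map (fun p => p.2 - p.1 + 1)
  let pre := weights.foldl (fun (acc : List Int) w => acc ++ [acc.getLast?.getD 0 + w]) [(0 : Int)]
  let total := pre.getLast?.getD 0
  let neg := strandness = some "-"
  (starts.zip (ends.zip (weights.zip pre))).map (fun q =>
    let t_end := if neg then total - q.2.2.2 else q.2.2.2 + q.2.2.1
    [("g_start", q.1), ("g_end", q.2.1), ("t_start", t_end - (q.2.2.1 - 1)), ("t_end", t_end)])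

-- ===== PRECONDITION & SPEC =====
-- Pre_ excludes exactly the inputs where Python A raises KeyError: an exon dict missing 'start' or 'end'.
def Pre_exons_loop (exons : List (List (String × Int))) (strandness : Option String) : Prop :=
  ∀ x ∈ exons, (x.map Prod.fst).count "start" > 0 ∧ (x.map Prod.fst).count "end" > 0
instance (exons : List (List (String × Int))) (strandness : Option String) : Decidable (Pre_exons_loop exons strandness) := by unfold Pre_exons_loop; infer_instance
def pvWitness_exons_loop : (List (List (String × Int))) × Option String :=
  ([[("start", 3), ("end", 7)], [("start", 10), ("end", 12)]], some "-")

def Spec_exons_loop (exons : List (List (String × Int))) (strandness : Option String) (out : List (List (String × Int))) : Prop := out = exons_loop_alt exons strandness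
instance (exons : List (List (String × Int))) (strandness : Option String) (out : List (List (String × Int))) : Decidable (Spec_exons_loop exons strandness out) := by unfold Spec_exons_loop; infer_instance

-- ===== CLAIM (what is proved, stated in full; the proofs are below) =====
def Claim_equal_exons_loop : Prop := ∀ (exons : List (List (String × Int))) (strandness : Option String), Dom_exons_loop exons strandness → Pre_exons_loop exons strandness → Spec_exons_loop exons strandness (exons_loop exons strandness)

-- ===== LEMMAS AND PROOFS =====

def wV (x : List (String × Int)) : Int := eVal x - sVal x + 1

def entryP (x : List (String × Int)) (t_end : Int) : List (String × Int) :=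
  [("g_start", sVal x), ("g_end", eVal x), ("t_start", t_end - (eVal x - sVal x)), ("t_end", t_end)]

def sumW (xs : List (List (String × Int))) : Int := (xs.map wV).sum

-- canonical forward result: t_end accumulates p + weight
def pvPos (xs : List (List (String × Int))) (p : Int) : List (List (String × Int)) :=
  match xs with
  | [] => []
  | x :: xs => entryP x (p + wV x) :: pvPos xs (p + wV x)

-- canonical '-' result in ORIGINAL order: t_end counts down from T by weights
def pvNeg (xs : List (List (String × Int))) (T : Int) : List (List (String × Int)) :=
  match xs with
  | [] => []
  | x :: xs => entryP x T :: pvNeg xs (T - wV x)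

-- exclusive prefix list (tail of Python's `prefix`)
def prefL (ws : List Int) (q : Int) : List Int :=
  match ws with
  | [] => []
  | w :: ws => (q + w) :: prefL ws (q + w)

lemma a_fold (xs : List (List (String × Int))) (p : Int) (acc : List (List (String × Int))) :
    (xs.foldl (fun (st : Int × List (List (String × Int))) x =>
      let s := sVal x
      let e := eVal x
      let exon_length := e - s
      let t_start := st.1 + 1
      let t_end := t_start + exon_length
      (t_end, st.2 ++ [[("g_start", s), ("g_end", e), ("t_start", t_start), ("t_end", t_end)]]))
      (p, acc)).2 = acc ++ pvPos xs p := by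
  induction xs generalizing p acc with
  | nil => simp [pvPos]
  | cons x xs ih =>
      simp only [List.foldl, pvPos, ih, entryP, wV]
      have h1 : p + (eVal x - sVal x + 1) - (eVal x - sVal x) = p + 1 := by ring
      have h2 : p + 1 + (eVal x - sVal x) = p + (eVal x - sVal x + 1) := by ring
      simp [h1, h2]

lemma sumW_cons (x : List (String × Int)) (xs : List (List (String × Int))) :
    sumW (x :: xs) = wV x + sumW xs := by simp [sumW]

lemma sumW_reverse (xs : List (List (String × Int))) : sumW xs.reverse = sumW xs := by
  simp [sumW]

lemma pvPos_append (ys zs : List (List (String × Int))) (p : Int) :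
    pvPos (ys ++ zs) p = pvPos ys p ++ pvPos zs (p + sumW ys) := by
  induction ys generalizing p with
  | nil => simp [pvPos, sumW]
  | cons y ys ih => simp [pvPos, ih, sumW_cons, add_assoc]

lemma pvPos_reverse (xs : List (List (String × Int))) (p : Int) :
    (pvPos xs.reverse p).reverse = pvNeg xs (p + sumW xs) := by
  induction xs generalizing p with
  | nil => simp [pvPos, pvNeg]
  | cons x xs ih =>
      have : (x :: xs).reverse = xs.reverse ++ [x] := by simp
      rw [this, pvPos_append]
      simp only [pvPos, pvNeg, List.reverse_append, List.reverse_cons, List.reverse_nil,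
        List.nil_append, List.cons_append, sumW_reverse, sumW_cons]
      rw [ih]
      rw [show p + sumW xs + wV x = p + (wV x + sumW xs) from by ring,
          show p + (wV x + sumW xs) - wV x = p + sumW xs from by ring]

lemma pre_fold (ws : List Int) (acc : List Int) (q : Int) (h : acc.getLast? = some q) :
    ws.foldl (fun (acc : List Int) w => acc ++ [acc.getLast?.getD 0 + w]) acc = acc ++ prefL ws q := by
  induction ws generalizing acc q with
  | nil => simp [prefL]
  | cons w ws ih =>
      simp only [List.foldl, prefL, h, Option.getD_some]
      rw [ih (acc ++ [q + w]) (q + w) (by simp)]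
      simp

lemma last_prefL (ws : List Int) (q : Int) :
    (q :: prefL ws q).getLast?.getD 0 = q + ws.sum := by
  induction ws generalizing q with
  | nil => simp [prefL]
  | cons w ws ih =>
      simp only [prefL, List.getLast?_cons_cons]
      rw [ih (q + w)]
      simp; ring

lemma weights_eq (xs : List (List (String × Int))) :
    ((xs.map sVal).zip (xs.map eVal)).map (fun p => p.2 - p.1 + 1) = xs.map wV := by
  rw [List.zip_map']
  simp [wV]

-- the quadruple zip consumed by B's final pass, in canonical cons shape
lemma quad_cons (x : List (String × Int)) (xs : List (List (String × Int))) (q : Int) :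
    (((x :: xs).map sVal).zip (((x :: xs).map eVal).zip (((x :: xs).map wV).zip (q :: prefL ((x :: xs).map wV) q))))
    = (sVal x, (eVal x, (wV x, q))) ::
      ((xs.map sVal).zip ((xs.map eVal).zip ((xs.map wV).zip ((q + wV x) :: prefL (xs.map wV) (q + wV x))))) := by
  simp [prefL]

lemma b_map_pos (xs : List (List (String × Int))) (q : Int) :
    ((xs.map sVal).zip ((xs.map eVal).zip ((xs.map wV).zip (q :: prefL (xs.map wV) q)))).map (fun p =>
      [("g_start", p.1), ("g_end", p.2.1), ("t_start", p.2.2.2 + p.2.2.1 - (p.2.2.1 - 1)), ("t_end", p.2.2.2 + p.2.2.1)])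
    = pvPos xs q := by
  induction xs generalizing q with
  | nil => simp [pvPos]
  | cons x xs ih =>
      rw [quad_cons]
      simp only [List.map_cons, pvPos, ih, entryP, wV]
      rw [show q + (eVal x - sVal x + 1) - (eVal x - sVal x + 1 - 1)
            = q + (eVal x - sVal x + 1) - (eVal x - sVal x) from by ring]

lemma b_map_neg (xs : List (List (String × Int))) (q T : Int) :
    ((xs.map sVal).zip ((xs.map eVal).zip ((xs.map wV).zip (q :: prefL (xs.map wV) q)))).map (fun p =>
      [("g_start", p.1), ("g_end", p.2.1), ("t_start", T - p.2.2.2 - (p.2.2.1 - 1)), ("t_end", T - p.2.2.2)])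
    = pvNeg xs (T - q) := by
  induction xs generalizing q with
  | nil => simp [pvNeg]
  | cons x xs ih =>
      rw [quad_cons]
      simp only [List.map_cons, pvNeg, ih, entryP, wV]
      rw [show T - q - (eVal x - sVal x + 1 - 1) = T - q - (eVal x - sVal x) from by ring,
          show T - (q + (eVal x - sVal x + 1)) = T - q - (eVal x - sVal x + 1) from by ring]

-- ===== VERDICT (by name: the statement is the Claim_ definition above) =====
theorem exons_loop_spec : Claim_equal_exons_loop := by
  intro exons strandness _ _
  unfold Spec_exons_loop exons_loop exons_loop_alt
  dsimp only
  rw [weights_eq]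
  rw [pre_fold (exons.map wV) [0] 0 (by simp)]
  have hpre : ([(0 : Int)] ++ prefL (exons.map wV) 0) = (0 : Int) :: prefL (exons.map wV) 0 := by simp
  rw [hpre, last_prefL]
  by_cases hneg : strandness = some "-"
  · subst hneg
    simp only [if_true, a_fold, List.nil_append]
    rw [pvPos_reverse]
    rw [b_map_neg exons 0 ((0 : Int) + (List.map wV exons).sum)]
    congr 1
    simp [sumW]
  · have hc : (strandness = some "-") = False := by simp [hneg]
    simp only [hc, if_false, a_fold, List.nil_append]
    rw [← b_map_pos exons 0]
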